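-- pv_equiv track=rewrite | github.com/zeropsio/zcp | eval/scripts/score.py | count_waste
-- ===== SOURCE A (Python) =====
-- WASTE_TOOLS = {"TodoWrite", "TodoRead", "Task", "TaskCreate", "TaskUpdate", "TaskList"}
--
-- MAX_CLEAN_EVENT_POLLS = 5
--
-- def count_event_polls(tool_calls):
--     """Count zerops_events calls."""
--     return sum(1 for tc in tool_calls if tc["tool"] == "zerops_events")
--
-- def count_waste(tool_calls):
--     """Count and categorize wasted tool calls."""
--     breakdown = {}
--     total = 0
--
--     for tc in tool_calls:
--         tool = tc["tool"]
--         if tool in WASTE_TOOLS: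
--             breakdown[tool] = breakdown.get(tool, 0) + 1
--             total += 1
--
--     # Excess event polls (beyond MAX_CLEAN_EVENT_POLLS)
--     event_polls = count_event_polls(tool_calls)
--     excess_polls = max(0, event_polls - MAX_CLEAN_EVENT_POLLS)
--     if excess_polls > 0:
--         breakdown["excess_event_polls"] = excess_polls
--         total += excess_polls
--
--     # Redundant subdomain calls (more than 1)
--     subdomain_calls = sum(1 for tc in tool_calls if tc["tool"] == "zerops_subdomain")
--     if subdomain_calls > 1:
--         redundant = subdomain_calls - 1
--         breakdown["redundant_subdomain"] = redundant
--         total += redundant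
--
--     return total, breakdown
-- ===== SOURCE B (Python) =====
-- WASTE_TOOLS = {"TodoWrite", "TodoRead", "Task", "TaskCreate", "TaskUpdate", "TaskList"}
--
-- MAX_CLEAN_EVENT_POLLS = 5
--
-- def count_waste(tool_calls):
--     """Count and categorize wasted tool calls (single counting pass)."""
--     counts = {}
--     for tc in tool_calls:
--         t = tc["tool"]
--         counts[t] = counts.get(t, 0) + 1
--
--     breakdown = {t: c for t, c in counts.items() if t in WASTE_TOOLS}
--     total = sum(breakdown.values())
--
--     excess = counts.get("zerops_events", 0) - MAX_CLEAN_EVENT_POLLS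
--     if excess > 0:
--         breakdown["excess_event_polls"] = excess
--         total += excess
--
--     redundant = counts.get("zerops_subdomain", 0) - 1
--     if redundant > 0:
--         breakdown["redundant_subdomain"] = redundant
--         total += redundant
--
--     return total, breakdown
-- ===== Notes on version B (the rewrite author's own statement) =====
-- stated objective: alternative
-- what changed: A scans tool_calls three times (waste loop with running total, an events comprehension, a subdomain comprehension); B builds one frequency table of all tool names in a single pass and derives the breakdown, total, excess-polls and redundant-subdomain entries purely from that table.
import Mathlib
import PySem

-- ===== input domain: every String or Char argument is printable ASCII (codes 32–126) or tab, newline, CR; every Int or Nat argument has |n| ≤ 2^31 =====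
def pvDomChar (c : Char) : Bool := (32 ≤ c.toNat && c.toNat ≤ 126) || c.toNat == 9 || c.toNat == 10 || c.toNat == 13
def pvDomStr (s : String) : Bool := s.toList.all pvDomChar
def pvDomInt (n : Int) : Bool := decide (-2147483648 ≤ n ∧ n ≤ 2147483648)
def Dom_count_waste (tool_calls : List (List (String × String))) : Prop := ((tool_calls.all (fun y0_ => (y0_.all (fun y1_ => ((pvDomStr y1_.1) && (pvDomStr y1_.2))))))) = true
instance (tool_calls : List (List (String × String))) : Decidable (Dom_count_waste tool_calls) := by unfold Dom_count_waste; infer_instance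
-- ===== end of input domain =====

-- B replaces A's three scans over tool_calls by one frequency table from which
-- breakdown, total and the excess/redundant entries are derived (alternative decomposition).


-- ===== PORT A =====
-- WASTE_TOOLS (a literal set of six distinct names)
def pvWaste : List String := ["TodoWrite", "TodoRead", "Task", "TaskCreate", "TaskUpdate", "TaskList"]

-- tc["tool"]; Pre_ guarantees the key is present, so the "" default is never reached inside Pre_
def pvTool (tc : List (String × String)) : String :=
  ((PySem.Dict.mk tc).get? "tool").getD ""

def count_event_polls (tool_calls : List (List (String × String))) : Int :=
  (tool_calls.map (fun tc => if pvTool tc == "zerops_events" then (1 : Int) else 0)).sum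

def count_waste (tool_calls : List (List (String × String))) : Int × (List (String × Int)) :=
  let st := tool_calls.foldl
    (fun (st : PySem.Dict String Int × Int) tc =>
      let tool := pvTool tc
      if pvWaste.contains tool then (st.1.insert tool (st.1.getD tool 0 + 1), st.2 + 1) else st)
    (PySem.Dict.empty, 0)
  let breakdown := st.1
  let total := st.2
  let event_polls := count_event_polls tool_calls
  let excess_polls := max 0 (event_polls - 5)
  let st2 := if excess_polls > 0 then (breakdown.insert "excess_event_polls" excess_polls, total + excess_polls) else (breakdown, total)
  let subdomain_calls := (tool_calls.map (fun tc => if pvTool tc == "zerops_subdomain" then (1 : Int) else 0)).sum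
  let st3 := if subdomain_calls > 1 then (st2.1.insert "redundant_subdomain" (subdomain_calls - 1), st2.2 + (subdomain_calls - 1)) else st2
  (st3.2, st3.1.items)

-- ===== PORT B =====
def count_waste_alt (tool_calls : List (List (String × String))) : Int × (List (String × Int)) :=
  let counts := tool_calls.foldl
    (fun (d : PySem.Dict String Int) tc =>
      let t := pvTool tc
      d.insert t (d.getD t 0 + 1))
    PySem.Dict.empty
  let breakdown := counts.items.filter (fun p => pvWaste.contains p.1)
  let total := (breakdown.map Prod.snd).sum
  let excess := counts.getD "zerops_events" 0 - 5
  let st2 := if excess > 0 then (breakdown ++ [("excess_event_polls", excess)], total + excess) else (breakdown, total)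
  let redundant := counts.getD "zerops_subdomain" 0 - 1
  let st3 := if redundant > 0 then (st2.1 ++ [("redundant_subdomain", redundant)], st2.2 + redundant) else st2
  (st3.2, st3.1)

-- ===== PRECONDITION & SPEC =====
-- Pre_ excludes exactly the inputs where some call record lacks the "tool" key, on which A raises KeyError.
def Pre_count_waste (tool_calls : List (List (String × String))) : Prop :=
  ∀ tc ∈ tool_calls, "tool" ∈ tc.map Prod.fst
instance (tool_calls : List (List (String × String))) : Decidable (Pre_count_waste tool_calls) := by unfold Pre_count_waste; infer_instance

def pvWitness_count_waste : (List (List (String × String))) :=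
  [[("tool", "TodoWrite")], [("tool", "zerops_events")]]

def Spec_count_waste (tool_calls : List (List (String × String))) (out : Int × (List (String × Int))) : Prop := out = count_waste_alt tool_calls
instance (tool_calls : List (List (String × String))) (out : Int × (List (String × Int))) : Decidable (Spec_count_waste tool_calls out) := by unfold Spec_count_waste; infer_instance

-- ===== CLAIM (what is proved, stated in full; the proofs are below) =====
def Claim_equal_count_waste : Prop := ∀ (tool_calls : List (List (String × String))), Dom_count_waste tool_calls → Pre_count_waste tool_calls → Spec_count_waste tool_calls (count_waste tool_calls)

-- ===== LEMMAS AND PROOFS =====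

-- A's waste loop computes the insert-counter of the filtered name list, paired with its length.
lemma loopA (ns : List String) (d : PySem.Dict String Int) (t : Int) :
    ns.foldl (fun (st : PySem.Dict String Int × Int) n =>
        if pvWaste.contains n then (st.1.insert n (st.1.getD n 0 + 1), st.2 + 1) else st) (d, t)
    = ((ns.filter (fun n => pvWaste.contains n)).foldl
        (fun d n => d.insert n (d.getD n 0 + 1)) d,
       t + ((ns.filter (fun n => pvWaste.contains n)).length : Int)) := by
  induction ns generalizing d t with
  | nil => simp
  | cons n ns ih =>
    by_cases h : pvWaste.contains n = true
    · rw [List.foldl_cons, if_pos h, ih, List.filter_cons_of_pos h, List.foldl_cons,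
        List.length_cons]
      congr 1
      push_cast; ring
    · rw [List.foldl_cons, if_neg h, ih, List.filter_cons_of_neg h]

lemma loopA' (tcs : List (List (String × String))) :
    tcs.foldl (fun (st : PySem.Dict String Int × Int) tc =>
        if pvWaste.contains (pvTool tc) then
          (st.1.insert (pvTool tc) (st.1.getD (pvTool tc) 0 + 1), st.2 + 1) else st)
      (PySem.Dict.empty, 0)
    = (PySem.Dict.counter ((tcs.map pvTool).filter (fun n => pvWaste.contains n)),
       0 + (((tcs.map pvTool).filter (fun n => pvWaste.contains n)).length : Int)) := by
  rw [← PySem.Dict.foldl_insert_getD_add_one_eq_counter, ← loopA, List.foldl_map]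

-- B's counting loop is the counter of the name list.
lemma countsB (tcs : List (List (String × String))) :
    tcs.foldl (fun (d : PySem.Dict String Int) tc =>
        d.insert (pvTool tc) (d.getD (pvTool tc) 0 + 1)) PySem.Dict.empty
    = PySem.Dict.counter (tcs.map pvTool) := by
  rw [← PySem.Dict.foldl_insert_getD_add_one_eq_counter, List.foldl_map]

-- A's 0/1 comprehension sums are occurrence counts in the name list.
lemma sum_ite_count (c : String) (tcs : List (List (String × String))) :
    (tcs.map (fun tc => if pvTool tc == c then (1 : Int) else 0)).sum
    = (((tcs.map pvTool).count c : Nat) : Int) := by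
  induction tcs with
  | nil => rfl
  | cons tc tcs ih =>
    simp only [List.map_cons, List.sum_cons, List.count_cons, ih]
    by_cases h : pvTool tc = c
    · simp [h]; omega
    · simp [h]

-- Set.ofList commutes with filter.
lemma ofList_filter (p : String → Bool) (l : List String) :
    PySem.Set.ofList (l.filter p) = (PySem.Set.ofList l).filter p := by
  induction l using List.reverseRecOn with
  | nil => rfl
  | append_singleton xs x ih =>
    rw [List.filter_append, PySem.Set.ofList_append_singleton]
    by_cases h : p x = true
    · rw [List.filter_cons_of_pos h, List.filter_nil, PySem.Set.ofList_append_singleton, ih,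
        PySem.Set.add_eq_ite, PySem.Set.add_eq_ite]
      by_cases hm : x ∈ PySem.Set.ofList xs
      · have hmf : x ∈ (PySem.Set.ofList xs).filter p := List.mem_filter.2 ⟨hm, h⟩
        rw [if_pos hm, if_pos hmf]
      · have hmf : x ∉ (PySem.Set.ofList xs).filter p := fun hc => hm (List.mem_filter.1 hc).1
        rw [if_neg hm, if_neg hmf, List.filter_append, List.filter_cons_of_pos h, List.filter_nil]
    · rw [List.filter_cons_of_neg h, List.filter_nil, List.append_nil, ih, PySem.Set.add_eq_ite]
      by_cases hm : x ∈ PySem.Set.ofList xs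
      · rw [if_pos hm]
      · rw [if_neg hm, List.filter_append, List.filter_cons_of_neg h, List.filter_nil,
          List.append_nil]

-- filtering the items of counter(ns) gives the items of the counter of the filtered list
lemma counter_items_filter (p : String → Bool) (ns : List String) :
    (PySem.Dict.counter ns).items.filter (fun q => p q.1)
    = (PySem.Dict.counter (ns.filter p)).items := by
  rw [PySem.Dict.items_counter, PySem.Dict.items_counter, List.filter_map, ofList_filter]
  refine List.map_congr_left ?_
  intro k hk
  have hp : p k = true := (List.mem_filter.1 hk).2
  simp [List.count_filter hp]

-- sum of the counts of the distinct elements = length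
lemma sum_counts (l : List String) :
    ((PySem.Set.ofList l).map (fun k => ((l.count k : Nat) : Int))).sum = (l.length : Int) := by
  have hperm : (PySem.Set.ofList l).Perm l.dedup := by
    refine (List.perm_ext_iff_of_nodup (PySem.Set.nodup_ofList l) l.nodup_dedup).2 ?_
    intro a; rw [PySem.Set.mem_ofList, List.mem_dedup]
  rw [(hperm.map (fun k => ((l.count k : Nat) : Int))).sum_eq]
  have h2 := congrArg (Nat.cast : Nat → Int) (List.sum_map_count_dedup_eq_length l)
  rw [Nat.cast_list_sum, List.map_map] at h2
  exact h2

-- a name outside WASTE_TOOLS is not a key of the filtered counter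
lemma contains_counter_filter_false (k : String) (hk : pvWaste.contains k = false)
    (ns : List String) :
    (PySem.Dict.counter (ns.filter (fun n => pvWaste.contains n))).contains k = false := by
  rw [← Bool.not_eq_true]
  intro hc
  have hmem : k ∈ (PySem.Dict.counter (ns.filter (fun n => pvWaste.contains n))).keys :=
    (PySem.Dict.contains_iff_mem_keys _ _).1 hc
  rw [PySem.Dict.keys_counter, PySem.Set.mem_ofList] at hmem
  have h2 := (List.mem_filter.1 hmem).2
  rw [hk] at h2
  exact Bool.false_ne_true h2

-- sum of the values of a counter = length of the counted list
lemma values_sum (l : List String) :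
    ((PySem.Dict.counter l).items.map Prod.snd).sum = (l.length : Int) := by
  rw [PySem.Dict.items_counter, List.map_map]
  exact sum_counts l

-- ===== VERDICT (by name: the statement is the Claim_ definition above) =====
theorem count_waste_spec : Claim_equal_count_waste := by
  intro tcs _ _
  unfold Spec_count_waste
  simp only [count_waste, count_waste_alt, count_event_polls]
  rw [loopA', countsB, sum_ite_count, sum_ite_count,
    counter_items_filter (fun n => pvWaste.contains n), values_sum,
    PySem.Dict.getD_counter, PySem.Dict.getD_counter]
  have hce : pvWaste.contains "excess_event_polls" = false := by decide
  have hcr : pvWaste.contains "redundant_subdomain" = false := by decide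
  set ns := List.map pvTool tcs with hns
  set K := PySem.Dict.counter (ns.filter (fun n => pvWaste.contains n)) with hK
  have hKe := contains_counter_filter_false _ hce ns
  have hKr := contains_counter_filter_false _ hcr ns
  rw [← hK] at hKe hKr
  set ce : Int := ((ns.count "zerops_events" : Nat) : Int) with hce2
  set cs : Int := ((ns.count "zerops_subdomain" : Nat) : Int) with hcs2
  simp only [zero_add]
  by_cases h1 : (0 : Int) < ce - 5
  · rw [max_eq_right (by omega : (0 : Int) ≤ ce - 5)]
    have hKr2 : (K.insert "excess_event_polls" (ce - 5)).contains "redundant_subdomain" = false := by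
      rw [PySem.Dict.contains_insert, hKr]; decide
    split_ifs
    all_goals first
      | (exfalso; omega)
      | (simp only [PySem.Dict.items_insert_of_not_contains _ _ hKr2,
           PySem.Dict.items_insert_of_not_contains _ _ hKe])
  · rw [max_eq_left (by omega : ce - 5 ≤ (0 : Int))]
    split_ifs
    all_goals first
      | (exfalso; omega)
      | simp only [PySem.Dict.items_insert_of_not_contains _ _ hKr]
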